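-- pv_equiv track=rewrite | github.com/ffavela/scripts4Chimera | format2SpreadSheet.py | getSuffixAndShift
-- ===== SOURCE A (Python) =====
-- def inTestRange(nHN):
--     for val in nHN:
--         if val not in range(1192):
--             return False
--     return True
--
-- def getSuffixAndShift(valList):
--     if valList[0][0].isdigit():
--         return "",0
--     suffix=valList[0][0][0]
--     justHistNums=[int(val[0][1:]) for val in valList]
--     delta=12000 #assuming shift is a multiple of 12000
--     shift=0
--     for i in range(20): #a "normal" range to search
--         shift+=delta
--         newHistNums=[hVal-shift for hVal in justHistNums]
--         if inTestRange(newHistNums):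
--             return suffix,shift
--     return suffix,"None"
-- ===== SOURCE B (Python) =====
-- def getSuffixAndShift(valList):
--     if valList[0][0].isdigit():
--         return "", 0
--     suffix = valList[0][0][0]
--     justHistNums = [int(val[0][1:]) for val in valList]
--     mn = min(justHistNums)
--     mx = max(justHistNums)
--     # smallest k >= 1 with 12000*k >= mx - 1191 (ceiling division)
--     k = max(1, -((1191 - mx) // 12000))
--     if k <= 20 and 12000 * k <= mn:
--         return suffix, 12000 * k
--     return suffix, "None"
-- ===== Notes on version B (the rewrite author's own statement) =====
-- stated objective: faster
-- what changed: Replaces the search loop (up to 20 full rescans, each building a shifted copy of the list) by one min/max pass and a closed-form ceiling division that yields the smallest admissible multiple of 12000 directly.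
-- outside the precondition, e.g. on getSuffixAndShift([['a0']]): A returns ('a', 'None'), B returns ('a', 'None')
import Mathlib
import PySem

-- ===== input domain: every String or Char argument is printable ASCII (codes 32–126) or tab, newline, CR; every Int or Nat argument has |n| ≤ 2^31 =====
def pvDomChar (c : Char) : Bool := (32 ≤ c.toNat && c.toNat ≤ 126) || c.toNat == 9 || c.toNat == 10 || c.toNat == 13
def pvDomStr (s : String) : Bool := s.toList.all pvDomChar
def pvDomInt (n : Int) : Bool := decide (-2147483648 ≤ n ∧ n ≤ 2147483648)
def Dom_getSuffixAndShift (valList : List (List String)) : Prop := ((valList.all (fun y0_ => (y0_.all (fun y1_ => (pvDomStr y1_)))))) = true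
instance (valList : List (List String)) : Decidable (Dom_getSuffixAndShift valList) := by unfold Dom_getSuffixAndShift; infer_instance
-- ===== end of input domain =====

-- B replaces A's up-to-20 rescans (each building a shifted copy of the list) by one min/max
-- pass and a closed-form ceiling division giving the smallest admissible multiple of 12000.

-- shared helper: int(val[0][1:]) for one row (none = IndexError/ValueError)
def pvParse (row : List String) : Option Int :=
  row.head?.bind (fun s => PySem.Int.ofStr? (PySem.Str.slice s (some 1) none))

-- shared helper: the comprehension [int(val[0][1:]) for val in valList]
def pvParseAll (valList : List (List String)) : Option (List Int) :=
  valList.mapM pvParse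

-- ===== PORT A =====
-- for val in nHN: if val not in range(1192): return False / return True
def inTestRange : List Int → Bool
  | [] => true
  | v :: rest => if ¬ (0 ≤ v ∧ v < 1192) then false else inTestRange rest

-- the 'for i in range(20)' search loop of A, fuel = remaining iterations
def aLoop (justHistNums : List Int) (suffix : String) (shift : Int) : Nat → String × Int
  | 0 => (suffix, 0)      -- Python returns (suffix, "None") here: outside Pre_ (not an Int)
  | n + 1 =>
    let shift' := shift + 12000
    if inTestRange (justHistNums.map (fun hVal => hVal - shift')) then (suffix, shift')
    else aLoop justHistNums suffix shift' n

def getSuffixAndShift (valList : List (List String)) : String × Int :=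
  match valList.head?.bind (fun r => r.head?) with
  | none => ("", 0)       -- IndexError: outside Pre_
  | some s0 =>
    if PySem.Str.strIsdigit s0 then ("", 0)
    else
      match PySem.Str.pyGet? s0 0 with
      | none => ("", 0)   -- IndexError: outside Pre_
      | some c =>
        let suffix := String.ofList [c]
        match pvParseAll valList with
        | none => ("", 0) -- ValueError/IndexError in the comprehension: outside Pre_
        | some justHistNums => aLoop justHistNums suffix 0 20

-- ===== PORT B =====
def getSuffixAndShift_alt (valList : List (List String)) : String × Int :=
  match valList.head?.bind (fun r => r.head?) with
  | none => ("", 0)       -- IndexError: outside Pre_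
  | some s0 =>
    if PySem.Str.strIsdigit s0 then ("", 0)
    else
      match PySem.Str.pyGet? s0 0 with
      | none => ("", 0)   -- IndexError: outside Pre_
      | some c =>
        let suffix := String.ofList [c]
        match pvParseAll valList with
        | none => ("", 0) -- ValueError/IndexError in the comprehension: outside Pre_
        | some nums =>
          match PySem.List.min? nums (fun x => x), PySem.List.max? nums (fun x => x) with
          | some mn, some mx =>
            let k := max 1 (-(PySem.Int.floordiv (1191 - mx) 12000))
            if k ≤ 20 ∧ 12000 * k ≤ mn then (suffix, 12000 * k)
            else (suffix, 0)   -- Python returns (suffix, "None") here: outside Pre_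
          | _, _ => ("", 0)    -- unreachable: nums nonempty whenever valList[0] exists
        
-- ===== PRECONDITION & SPEC =====
-- Pre_ excludes the inputs where A raises (empty valList/row, empty first string, a suffix
-- whose tail is not an int literal) and the inputs where A returns (suffix, "None") — a str
-- where the declared result type has an Int, hence not representable; B behaves like A there.
def Pre_getSuffixAndShift (valList : List (List String)) : Prop :=
  (match valList.head?.bind (fun r => r.head?) with
   | none => false
   | some s0 =>
     if PySem.Str.strIsdigit s0 then true
     else
       match pvParseAll valList with
       | none => false
       | some nums =>
         (PySem.List.pyRange 1 21 1).any (fun k =>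
           nums.all (fun n => decide (12000 * k ≤ n ∧ n ≤ 12000 * k + 1191)))) = true
instance (valList : List (List String)) : Decidable (Pre_getSuffixAndShift valList) := by
  unfold Pre_getSuffixAndShift; infer_instance

def pvWitness_getSuffixAndShift : List (List String) := [["a12000"], ["b12500"]]

def Spec_getSuffixAndShift (valList : List (List String)) (out : String × Int) : Prop := out = getSuffixAndShift_alt valList
instance (valList : List (List String)) (out : String × Int) : Decidable (Spec_getSuffixAndShift valList out) := by unfold Spec_getSuffixAndShift; infer_instance

-- ===== CLAIM (what is proved, stated in full; the proofs are below) =====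
def Claim_equal_getSuffixAndShift : Prop := ∀ (valList : List (List String)), Dom_getSuffixAndShift valList → Pre_getSuffixAndShift valList → Spec_getSuffixAndShift valList (getSuffixAndShift valList)

-- ===== LEMMAS AND PROOFS =====

lemma inTestRange_eq_all (l : List Int) :
    inTestRange l = l.all (fun v => decide (0 ≤ v ∧ v < 1192)) := by
  induction l with
  | nil => rfl
  | cons v rest ih =>
    simp only [inTestRange, List.all_cons, ih]
    by_cases h : 0 ≤ v ∧ v < 1192 <;> simp [h]

lemma inTestRange_shift (nums : List Int) (s : Int) :
    inTestRange (nums.map (fun hVal => hVal - s)) = true ↔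
      ∀ n ∈ nums, s ≤ n ∧ n ≤ s + 1191 := by
  rw [inTestRange_eq_all]
  simp only [List.all_map, List.all_eq_true, Function.comp, decide_eq_true_eq]
  constructor
  · intro h n hn; have := h n hn; omega
  · intro h n hn; have := h n hn; omega

-- the search loop hits exactly the smallest good multiple
lemma aLoop_eq (nums : List Int) (suffix : String) (kB : Int)
    (hGood : ∀ n ∈ nums, 12000 * kB ≤ n ∧ n ≤ 12000 * kB + 1191)
    (hMin : ∀ k : Int, 1 ≤ k → k < kB → ¬ (∀ n ∈ nums, 12000 * k ≤ n ∧ n ≤ 12000 * k + 1191)) :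
    ∀ (fuel : Nat) (j : Int), 0 ≤ j → j < kB → kB ≤ j + fuel →
      aLoop nums suffix (12000 * j) fuel = (suffix, 12000 * kB) := by
  intro fuel
  induction fuel with
  | zero => intro j _ h1 h2; omega
  | succ n ih =>
    intro j hj0 hjk hkb
    simp only [aLoop]
    have hsh : 12000 * j + 12000 = 12000 * (j + 1) := by ring
    rw [hsh]
    by_cases h : inTestRange (nums.map (fun hVal => hVal - 12000 * (j + 1))) = true
    · rw [if_pos h]
      rw [inTestRange_shift] at h
      have : ¬ (j + 1 < kB) := fun hlt => hMin (j + 1) (by omega) hlt h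
      have : j + 1 = kB := by omega
      rw [this]
    · rw [if_neg h]
      have hne : j + 1 ≠ kB := by
        intro he; apply h; rw [inTestRange_shift, he]; exact hGood
      exact ih (j + 1) (by omega) (by omega) (by omega)

lemma mapM_ne_nil {r : List String} {rs : List (List String)} {nums : List Int}
    (h : pvParseAll (r :: rs) = some nums) : nums ≠ [] := by
  simp only [pvParseAll, List.mapM_cons] at h
  cases hp : pvParse r with
  | none => rw [hp] at h; simp at h
  | some v =>
    rw [hp] at h
    cases ht : (rs.mapM pvParse) with
    | none => rw [ht] at h; simp at h
    | some t => rw [ht] at h; simp at h; simp [← h]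

-- ===== VERDICT (by name: the statement is the Claim_ definition above) =====
theorem getSuffixAndShift_spec : Claim_equal_getSuffixAndShift := by
  intro valList _ hpre
  unfold Spec_getSuffixAndShift
  unfold Pre_getSuffixAndShift at hpre
  unfold getSuffixAndShift getSuffixAndShift_alt
  cases h0 : valList.head?.bind (fun r => r.head?) with
  | none => rw [h0] at hpre
  | some s0 =>
    rw [h0] at hpre
    dsimp only at hpre ⊢
    by_cases hd : PySem.Str.strIsdigit s0 = true
    · rw [if_pos hd, if_pos hd]
    · rw [if_neg hd, if_neg hd]
      rw [if_neg hd] at hpre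
      cases hg : PySem.Str.pyGet? s0 0 with
      | none => rfl
      | some c =>
        cases hp : pvParseAll valList with
        | none => rw [hp] at hpre
        | some nums =>
          rw [hp] at hpre
          -- nums is nonempty
          have hvne : valList ≠ [] := by
            intro he; rw [he] at h0; simp at h0
          obtain ⟨r, rs, hre⟩ := List.exists_cons_of_ne_nil hvne
          have hnne : nums ≠ [] := mapM_ne_nil (hre ▸ hp)
          -- extract the good k from Pre_
          rw [List.any_eq_true] at hpre
          obtain ⟨k0, hk0mem, hk0⟩ := hpre
          rw [PySem.List.mem_pyRange_one] at hk0mem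
          rw [List.all_eq_true] at hk0
          have hk0' : ∀ n ∈ nums, 12000 * k0 ≤ n ∧ n ≤ 12000 * k0 + 1191 := by
            intro n hn; have := hk0 n hn; simpa using this
          -- min and max
          cases hmn : PySem.List.min? nums (fun x => x) with
          | none => exact absurd ((PySem.List.min?_eq_none_iff _ _).mp hmn) hnne
          | some mn =>
            cases hmx : PySem.List.max? nums (fun x => x) with
            | none => exact absurd ((PySem.List.max?_eq_none_iff _ _).mp hmx) hnne
            | some mx =>
              dsimp only
              rw [hmn, hmx]
              dsimp only
              have hmn_mem := PySem.List.min?_mem hmn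
              have hmx_mem := PySem.List.max?_mem hmx
              have hmn_min := PySem.List.min?_isMin hmn
              have hmx_max := PySem.List.max?_isMax hmx
              -- the ceiling
              set c1 : Int := -(PySem.Int.floordiv (1191 - mx) 12000) with hc
              have hceil : (c1 - 1) * 12000 < mx - 1191 ∧ mx - 1191 ≤ c1 * 12000 := by
                have harg : -(mx - 1191) = 1191 - mx := by ring
                exact (PySem.Int.neg_floordiv_neg_eq_iff_of_pos
                  (a := mx - 1191) (b := 12000) (q := c1) (by omega)).mp (by rw [harg])
              set kB : Int := max 1 c1 with hkB
              have hc_le_k0 : c1 ≤ k0 := by nlinarith [hk0' mx hmx_mem, hceil.1]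
              have hkB_le_k0 : kB ≤ k0 := by omega
              have hGood : ∀ n ∈ nums, 12000 * kB ≤ n ∧ n ≤ 12000 * kB + 1191 := by
                intro n hn
                have h1 : mn ≤ n := hmn_min n hn
                have h2 : n ≤ mx := hmx_max n hn
                have h3 := hk0' mn hmn_mem
                have h4 : mx - 1191 ≤ c1 * 12000 := hceil.2
                have h5 : c1 ≤ kB := le_max_right _ _
                constructor <;> nlinarith
              have hMin : ∀ k : Int, 1 ≤ k → k < kB →
                  ¬ (∀ n ∈ nums, 12000 * k ≤ n ∧ n ≤ 12000 * k + 1191) := by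
                intro k hk1 hkkB hall
                have hkBc : kB = c1 := by omega
                have := hall mx hmx_mem
                nlinarith [hceil.1]
              have hcond : kB ≤ 20 ∧ 12000 * kB ≤ mn :=
                ⟨by omega, (hGood mn hmn_mem).1⟩
              rw [if_pos hcond]
              have := aLoop_eq nums (String.ofList [c]) kB hGood hMin 20 0 (by omega)
                (by omega) (by omega)
              simpa using this
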